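-- pv_equiv track=rewrite | github.com/jaynopponep/vswep | Week 2/cs_gca_secret_code.py | num_combinations
-- ===== SOURCE A (Python) =====
-- from typing import List
--
-- def num_combinations(fragments: List[int], accessCode: int) -> int:
--     n = len(fragments)
--     numCombos = 0
--     for i in range(n):
--         for j in range(n):
--             if i != j and (str(fragments[i]) + str(fragments[j])) == str(accessCode):
--                 numCombos += 1
--     return numCombos
-- ===== SOURCE B (Python) =====
-- from typing import List
-- from collections import Counter
--
-- def num_combinations(fragments: List[int], accessCode: int) -> int:
--     code = str(accessCode)
--     strs = [str(f) for f in fragments]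
--     cnt = Counter(strs)
--     total = 0
--     for s in strs:
--         if code.startswith(s):
--             t = code[len(s):]
--             total += cnt.get(t, 0)
--             if t == s:
--                 total -= 1
--     return total
-- ===== Notes on version B (the rewrite author's own statement) =====
-- stated objective: faster
-- what changed: Replaced A's quadratic all-pairs scan (re-stringifying both fragments and the code on every pair) by a single pass that stringifies once, builds a Counter of fragment strings, and for each fragment that prefixes the code looks up the required suffix, subtracting the self-pair.
import Mathlib
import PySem

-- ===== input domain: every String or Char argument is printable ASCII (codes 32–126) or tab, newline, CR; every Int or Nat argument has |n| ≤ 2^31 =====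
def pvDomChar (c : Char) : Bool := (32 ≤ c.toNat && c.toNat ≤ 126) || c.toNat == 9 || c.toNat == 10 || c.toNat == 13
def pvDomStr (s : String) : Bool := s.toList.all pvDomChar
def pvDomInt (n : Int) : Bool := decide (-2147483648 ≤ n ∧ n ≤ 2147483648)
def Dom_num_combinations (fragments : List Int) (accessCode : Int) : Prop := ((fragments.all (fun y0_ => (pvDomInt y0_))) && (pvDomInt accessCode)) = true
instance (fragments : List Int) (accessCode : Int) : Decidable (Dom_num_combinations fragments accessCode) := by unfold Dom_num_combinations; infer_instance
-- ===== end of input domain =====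

-- B replaces A's quadratic all-pairs scan by one hash-counter pass over the fragment strings (look up the required suffix, subtract the self-pair).

-- ===== PORT A =====
def num_combinations (fragments : List Int) (accessCode : Int) : Int :=
  (PySem.List.pyRange 0 (fragments.length : Int) 1).foldl (fun numCombos i =>
    (PySem.List.pyRange 0 (fragments.length : Int) 1).foldl (fun numCombos j =>
      if i ≠ j ∧ PySem.Int.toChars (PySem.List.pyGetD fragments i 0) ++ PySem.Int.toChars (PySem.List.pyGetD fragments j 0) = PySem.Int.toChars accessCode
      then numCombos + 1 else numCombos) numCombos) 0

-- ===== PORT B =====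
def num_combinations_alt (fragments : List Int) (accessCode : Int) : Int :=
  let code := PySem.Int.toChars accessCode
  let strs := fragments.map (fun f => PySem.Int.toChars f)
  let cnt : PySem.Dict (List Char) Int := PySem.Dict.counter strs
  strs.foldl (fun total s =>
    if PySem.Chars.startswith code s then
      -- t = code[len(s):]: the index is a natural number, so the slice is List.drop (exact)
      let t := code.drop s.length
      let total := total + cnt.getD t 0
      if t = s then total - 1 else total
    else total) 0

-- ===== PRECONDITION & SPEC =====
def Spec_num_combinations (fragments : List Int) (accessCode : Int) (out : Int) : Prop := out = num_combinations_alt fragments accessCode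
instance (fragments : List Int) (accessCode : Int) (out : Int) : Decidable (Spec_num_combinations fragments accessCode out) := by unfold Spec_num_combinations; infer_instance

-- ===== CLAIM (what is proved, stated in full; the proofs are below) =====
def Claim_equal_num_combinations : Prop := ∀ (fragments : List Int) (accessCode : Int), Dom_num_combinations fragments accessCode → Spec_num_combinations fragments accessCode (num_combinations fragments accessCode)

-- ===== LEMMAS AND PROOFS =====

-- the per-fragment contribution B adds for a fragment string s
def pvG (strs : List (List Char)) (code s : List Char) : Int :=
  if PySem.Chars.startswith code s then
    ((strs.count (code.drop s.length) : Int) - (if code.drop s.length = s then 1 else 0))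
  else 0

theorem pvRangeCast (n : Nat) : PySem.List.pyRange 0 (n : Int) 1 = List.map (fun k : Nat => (k : Int)) (List.range n) := by
  rw [PySem.List.pyRange_one]; simp

-- counting matches over all indices is counting in the mapped list
theorem pvCountIdx {α β : Type} [DecidableEq β] (xs : List α) (d : α) (f : α → β) (t : β) :
    (List.range xs.length).countP (fun j => decide (f (xs.getD j d) = t)) = (xs.map f).count t := by
  induction xs with
  | nil => simp
  | cons x xs ih =>
    simp only [List.length_cons, List.range_succ_eq_map, List.countP_cons, List.countP_map,
      Function.comp_def, List.getD_cons_succ, List.getD_cons_zero, List.map_cons, List.count_cons]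
    rw [ih]
    rcases eq_or_ne (f x) t with h | h
    · simp [h]
    · simp [h]

-- dropping the self index removes exactly one match (on a duplicate-free index list)
theorem pvCountPNe {β : Type} [DecidableEq β] (l : List β) (Q : β → Prop) [DecidablePred Q]
    (i : β) (hl : l.Nodup) (hi : i ∈ l) :
    l.countP (fun j => decide (¬ i = j ∧ Q j)) + (if Q i then 1 else 0) = l.countP (fun j => decide (Q j)) := by
  induction l with
  | nil => simp at hi
  | cons x xs ih =>
    simp only [List.countP_cons, List.nodup_cons] at *
    rcases List.mem_cons.mp hi with rfl | hi
    · have hc : ∀ j ∈ xs, decide (¬ i = j ∧ Q j) = true ↔ decide (Q j) = true := by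
        intro j hj; have : i ≠ j := fun h => hl.1 (h ▸ hj); simp [this]
      rw [List.countP_congr hc]; simp
    · rw [← ih hl.2 hi]; by_cases hx : i = x
      · exact absurd (hx ▸ hi) hl.1
      · simp [hx]; omega

-- splitting a concatenation against a fixed target
theorem pvAppendEq {α : Type} (s u code : List α) :
    s ++ u = code ↔ s <+: code ∧ u = code.drop s.length := by
  constructor
  · rintro rfl; exact ⟨⟨u, rfl⟩, by simp⟩
  · rintro ⟨⟨v, rfl⟩, rfl⟩; simp

-- the inner loop of A, for a valid index i, computes exactly B's per-fragment contribution
theorem pvInner (fragments : List Int) (code : List Char) (i : Int) (h0 : 0 ≤ i)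
    (hn : i < (fragments.length : Int)) :
    (((PySem.List.pyRange 0 (fragments.length : Int) 1).countP
        (fun j => decide (¬ i = j ∧ PySem.Int.toChars (PySem.List.pyGetD fragments i 0) ++ PySem.Int.toChars (PySem.List.pyGetD fragments j 0) = code)) : Nat) : Int)
      = pvG (fragments.map (fun f => PySem.Int.toChars f)) code (PySem.Int.toChars (PySem.List.pyGetD fragments i 0)) := by
  obtain ⟨k, rfl⟩ := Int.eq_ofNat_of_zero_le h0
  have hk : k < fragments.length := by exact_mod_cast hn
  rw [pvRangeCast, List.countP_map]
  simp only [Function.comp_def, PySem.List.pyGetD_natCast, Int.natCast_inj]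
  set s := PySem.Int.toChars (fragments.getD k 0) with hs
  set t := code.drop s.length with ht
  by_cases hsw : PySem.Chars.startswith code s = true
  · have hpre : s <+: code := (PySem.Chars.startswith_iff code s).mp hsw
    have hc : ∀ j ∈ List.range fragments.length,
        decide (¬ k = j ∧ s ++ PySem.Int.toChars (fragments.getD j 0) = code) = true
          ↔ decide (¬ k = j ∧ PySem.Int.toChars (fragments.getD j 0) = t) = true := by
      intro j _; simp only [decide_eq_true_eq]
      constructor
      · rintro ⟨hne, happ⟩; exact ⟨hne, ((pvAppendEq _ _ _).mp happ).2⟩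
      · rintro ⟨hne, hdrop⟩; exact ⟨hne, (pvAppendEq _ _ _).mpr ⟨hpre, hdrop⟩⟩
    rw [List.countP_congr hc]
    have hmem : k ∈ List.range fragments.length := List.mem_range.mpr hk
    have h2 := pvCountPNe (List.range fragments.length)
      (fun j => PySem.Int.toChars (fragments.getD j 0) = t) k (List.nodup_range) hmem
    have h1 := pvCountIdx fragments 0 (fun f => PySem.Int.toChars f) t
    rw [h1] at h2
    have h2' : (List.countP (fun j => decide (¬ k = j ∧ PySem.Int.toChars (fragments.getD j 0) = t)) (List.range fragments.length))
        + (if PySem.Int.toChars (fragments.getD k 0) = t then 1 else 0)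
        = (fragments.map (fun f => PySem.Int.toChars f)).count t := by
      have hcnt : (fragments.map (fun f => PySem.Int.toChars f)).count t
          = @List.count (List Char) instBEqOfDecidableEq t (fragments.map (fun f => PySem.Int.toChars f)) := by
        simp [List.count_eq_countP]
        apply List.countP_congr
        intro x _
        simp
      rw [hcnt]
      simpa using h2
    clear h2
    simp only [pvG, hsw, if_true, ← ht]
    by_cases hts : t = s
    · have : PySem.Int.toChars (fragments.getD k 0) = t := by rw [hts, hs]
      rw [if_pos this] at h2'
      rw [if_pos hts]
      omega
    · have : ¬ PySem.Int.toChars (fragments.getD k 0) = t := fun h => hts (by rw [← h, hs])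
      rw [if_neg this] at h2'
      rw [if_neg hts]
      omega
  · have hz : (List.range fragments.length).countP
        (fun j => decide (¬ k = j ∧ s ++ PySem.Int.toChars (fragments.getD j 0) = code)) = 0 := by
      rw [List.countP_eq_zero]
      intro j _ hj
      simp only [decide_eq_true_eq] at hj
      exact hsw ((PySem.Chars.startswith_iff code s).mpr ((pvAppendEq _ _ _).mp hj.2).1)
    rw [hz]
    simp [pvG, hsw]

theorem pvAltEq (fragments : List Int) (accessCode : Int) :
    num_combinations_alt fragments accessCode
      = ((fragments.map (fun f => PySem.Int.toChars f)).map
          (pvG (fragments.map (fun f => PySem.Int.toChars f)) (PySem.Int.toChars accessCode))).sum := by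
  unfold num_combinations_alt
  rw [PySem.List.foldl_congr_mem
    (g := fun total s => total + pvG (fragments.map (fun f => PySem.Int.toChars f)) (PySem.Int.toChars accessCode) s)
    (h := by
      intro total s _
      simp only [pvG, PySem.Dict.getD_counter]
      split_ifs <;> ring)]
  rw [PySem.List.foldl_add]
  simp

theorem num_combinations_spec_aux (fragments : List Int) (accessCode : Int) :
    num_combinations fragments accessCode = num_combinations_alt fragments accessCode := by
  unfold num_combinations
  rw [PySem.List.foldl_congr_mem
    (g := fun acc i => acc + pvG (fragments.map (fun f => PySem.Int.toChars f)) (PySem.Int.toChars accessCode) (PySem.Int.toChars (PySem.List.pyGetD fragments i 0)))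
    (h := by
      intro acc i hi
      rw [PySem.List.foldl_ite_add_one]
      rw [pvInner fragments (PySem.Int.toChars accessCode) i
        ((PySem.List.mem_pyRange_one.mp hi).1) ((PySem.List.mem_pyRange_one.mp hi).2)])]
  rw [PySem.List.foldl_add]
  rw [pvAltEq]
  have hm : (PySem.List.pyRange 0 (fragments.length : Int) 1).map (fun i => PySem.List.pyGetD fragments i 0) = fragments :=
    PySem.List.map_pyGetD_pyRange_zero' fragments 0
  have hmap : ∀ {γ : Type} (g' : Int → γ), (PySem.List.pyRange 0 (fragments.length : Int) 1).map
      (fun i => g' (PySem.List.pyGetD fragments i 0)) = fragments.map g' := by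
    intro γ g'
    rw [show (fun i => g' (PySem.List.pyGetD fragments i 0)) = (g' ∘ fun i => PySem.List.pyGetD fragments i 0) from rfl,
      ← List.map_map, hm]
  rw [hmap (fun x => pvG (fragments.map (fun f => PySem.Int.toChars f)) (PySem.Int.toChars accessCode) (PySem.Int.toChars x)),
    List.map_map]
  simp [Function.comp_def]

-- ===== VERDICT (by name: the statement is the Claim_ definition above) =====
theorem num_combinations_spec : Claim_equal_num_combinations := by
  intro fragments accessCode _
  unfold Spec_num_combinations
  exact num_combinations_spec_aux fragments accessCode
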